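-- pv_equiv track=rewrite | github.com/1david5/oj | HackerRank/algorithms/strings/gemstones.py | gemstones
-- ===== SOURCE A (Python) =====
-- def gemstones(rocks):
--     minerals = set()
--     gemsones = 0
--     rock_count = len(rocks)
--     for rock in rocks:
--         minerals.update(set(rock))
--     for mineral in minerals:
--         counter = 0
--         for rock in rocks:
--             if mineral in rock:
--                 counter += 1
--                 continue
--         if counter ==rock_count:
--             gemsones += 1
--     return gemsones
-- ===== SOURCE B (Python) =====
-- def gemstones(rocks):
--     counts = {}
--     for rock in rocks:
--         for c in set(rock):
--             counts[c] = counts.get(c, 0) + 1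
--     total = 0
--     for v in counts.values():
--         if v == len(rocks):
--             total += 1
--     return total
-- ===== Notes on version B (the rewrite author's own statement) =====
-- stated objective: alternative
-- what changed: Replaces A's per-mineral rescan of all rocks with a single frequency-table pass (increment each distinct character of each rock once) followed by one pass over the table counting entries equal to len(rocks).
import Mathlib
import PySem

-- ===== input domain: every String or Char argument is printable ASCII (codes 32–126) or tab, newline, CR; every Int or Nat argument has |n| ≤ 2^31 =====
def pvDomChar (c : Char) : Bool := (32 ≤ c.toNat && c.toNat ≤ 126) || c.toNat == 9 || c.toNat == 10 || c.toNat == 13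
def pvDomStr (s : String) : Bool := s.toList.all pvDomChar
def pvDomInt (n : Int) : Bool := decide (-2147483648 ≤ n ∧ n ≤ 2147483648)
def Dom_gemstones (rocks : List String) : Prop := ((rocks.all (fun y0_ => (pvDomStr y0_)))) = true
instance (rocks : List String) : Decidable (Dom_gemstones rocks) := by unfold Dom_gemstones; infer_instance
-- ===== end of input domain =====

-- B builds a per-character frequency table in one pass and counts entries equal to len(rocks),
-- instead of A's rescan of every rock for every mineral (objective: alternative algorithm).

-- ===== PORT A =====
-- 'mineral in rock' for a 1-char mineral is char membership in the rock's characters.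
def gemstones (rocks : List String) : Int :=
  let minerals : PySem.Set Char :=
    rocks.foldl (fun s rock => PySem.Set.update s (PySem.Set.ofList rock.toList)) PySem.Set.empty
  let rock_count : Int := rocks.length
  minerals.foldl (fun gemsones mineral =>
    let counter : Int := rocks.foldl (fun c rock => if mineral ∈ rock.toList then c + 1 else c) 0
    if counter = rock_count then gemsones + 1 else gemsones) 0

-- ===== PORT B =====
def gemstones_alt (rocks : List String) : Int :=
  let counts : PySem.Dict Char Int :=
    rocks.foldl (fun d rock =>
      (PySem.Set.ofList rock.toList).foldl (fun d c => d.insert c (d.getD c 0 + 1)) d)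
      PySem.Dict.empty
  counts.values.foldl (fun total v => if v = (rocks.length : Int) then total + 1 else total) 0

-- ===== PRECONDITION & SPEC =====
def Spec_gemstones (rocks : List String) (out : Int) : Prop := out = gemstones_alt rocks
instance (rocks : List String) (out : Int) : Decidable (Spec_gemstones rocks out) := by unfold Spec_gemstones; infer_instance

-- ===== CLAIM (what is proved, stated in full; the proofs are below) =====
def Claim_equal_gemstones : Prop := ∀ (rocks : List String), Dom_gemstones rocks → Spec_gemstones rocks (gemstones rocks)

-- ===== LEMMAS AND PROOFS =====

-- flattening a nested fold over per-rock element lists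
theorem foldl_foldl_flatMap {α β γ : Type} (g : α → List β) (f : γ → β → γ)
    (l : List α) (init : γ) :
    l.foldl (fun s r => (g r).foldl f s) init = (l.flatMap g).foldl f init := by
  induction l generalizing init with
  | nil => rfl
  | cons r rs ih => simp [List.flatMap_cons, List.foldl_append, ih]

-- A's per-mineral rescan counts the rocks whose character set contains m
theorem count_flatMap_ofList (rocks : List String) (m : Char) :
    ((rocks.flatMap (fun r => PySem.Set.ofList r.toList)).count m : Int)
      = rocks.foldl (fun c rock => if m ∈ rock.toList then c + 1 else c) 0 := by
  rw [PySem.List.foldl_ite_add_one]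
  induction rocks with
  | nil => rfl
  | cons r rs ih =>
    simp only [List.flatMap_cons, List.count_append, List.countP_cons]
    by_cases h : m ∈ r.toList
    · have h1 : (PySem.Set.ofList r.toList).count m = 1 :=
        List.count_eq_one_of_mem (PySem.Set.nodup_ofList _) (by simp [PySem.Set.mem_ofList, h])
      rw [h1]; simp [h]; omega
    · have h0 : (PySem.Set.ofList r.toList).count m = 0 :=
        List.count_eq_zero_of_not_mem (by simp [PySem.Set.mem_ofList, h])
      rw [h0]; simp [h]; omega

-- ===== VERDICT (by name: the statement is the Claim_ definition above) =====
theorem gemstones_spec : Claim_equal_gemstones := by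
  intro rocks _
  unfold Spec_gemstones gemstones gemstones_alt
  dsimp only
  set L := rocks.flatMap (fun r => PySem.Set.ofList r.toList) with hL
  -- B side: the table is Counter(L); its values are the per-character counts over ofList L
  rw [foldl_foldl_flatMap (fun r : String => PySem.Set.ofList r.toList)
        (fun (d : PySem.Dict Char Int) c => d.insert c (d.getD c 0 + 1)),
      ← hL, PySem.Dict.foldl_insert_getD_add_one_eq_counter]
  have hvals : (PySem.Dict.counter L).values
      = (PySem.Set.ofList L).map (fun k => (L.count k : Int)) := by
    simp [PySem.Dict.values, PySem.Dict.items_counter]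
  rw [hvals, List.foldl_map]
  -- A side: the mineral set is ofList L
  have hmin : rocks.foldl (fun s rock => PySem.Set.update s (PySem.Set.ofList rock.toList))
      PySem.Set.empty = PySem.Set.ofList L := by
    simp only [PySem.Set.update, PySem.Set.empty]
    rw [foldl_foldl_flatMap (fun r : String => PySem.Set.ofList r.toList) PySem.Set.add,
        ← hL, PySem.Set.ofList_eq_foldl]
  rw [hmin]
  -- both folds now count characters of ofList L whose rock-count equals rocks.length
  simp only [hL, count_flatMap_ofList]
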